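-- pv_equiv track=rewrite | github.com/VjatseslavL/Palk | Palk/Palk.py | countt
-- ===== SOURCE A (Python) =====
-- def countt(dict, xlist, ylist, qlist):
--
--     xdict = []
--     for i in dict:
--         for j in dict:
--             if [j, dict.get(j)] in xdict:
--                 continue
--             if ylist.count(dict.get(j)) != 1:
--                 if dict[i] == dict[j]:
--                     xdict.append([j, dict.get(j)])
--     return xdict
-- ===== SOURCE B (Python) =====
-- def countt(dict, xlist, ylist, qlist):
--     # One pass groups keys by value (first-occurrence order, located by ==,
--     # so unhashable values behave like A); then emit each qualifying group.
--     groups = []  # [value, [keys]] in first-occurrence order of values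
--     for k in dict:
--         v = dict[k]
--         for g in groups:
--             if g[0] == v:
--                 g[1].append(k)
--                 break
--         else:
--             groups.append([v, [k]])
--     out = []
--     for v, ks in groups:
--         if ylist.count(v) != 1:
--             for k in ks:
--                 out.append([k, v])
--     return out
-- ===== Notes on version B (the rewrite author's own statement) =====
-- stated objective: faster
-- what changed: B replaces A's quadratic nested key scan with dedup-by-membership in the growing output by a single grouping pass collecting, per distinct value in first-occurrence order, its keys, then emits each group whose value occurs != 1 times in ylist (timing: A timed out at n=1024 where B answered; 194x at n=256).
import Mathlib
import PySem

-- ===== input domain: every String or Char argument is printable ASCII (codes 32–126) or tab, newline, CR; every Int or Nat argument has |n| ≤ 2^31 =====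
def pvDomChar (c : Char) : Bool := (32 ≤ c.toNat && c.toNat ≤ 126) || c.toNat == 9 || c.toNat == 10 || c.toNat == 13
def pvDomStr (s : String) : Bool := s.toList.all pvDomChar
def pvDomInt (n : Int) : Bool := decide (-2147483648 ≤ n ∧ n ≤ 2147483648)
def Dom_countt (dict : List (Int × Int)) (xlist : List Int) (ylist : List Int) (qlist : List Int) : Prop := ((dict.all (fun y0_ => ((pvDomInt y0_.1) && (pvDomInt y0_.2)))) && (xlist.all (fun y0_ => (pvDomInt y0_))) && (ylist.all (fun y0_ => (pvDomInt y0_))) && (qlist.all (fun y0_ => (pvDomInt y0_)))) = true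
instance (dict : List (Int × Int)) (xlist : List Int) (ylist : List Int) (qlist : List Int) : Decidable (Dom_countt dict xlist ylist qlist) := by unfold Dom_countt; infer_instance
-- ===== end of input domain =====

-- B groups keys by value in one pass (first-occurrence order of values) and then emits
-- each qualifying group, instead of A's nested all-pairs scan deduplicated by membership
-- in the growing output; objective: faster (measured). Pre_ restricts the association list to distinct keys, i.e. to lists
-- that actually represent a Python dict (A's Python argument is a dict, so this excludes
-- no Python input).


-- ===== PORT A =====
-- 'for i in dict' iterates the keys; dict[i] / dict.get(i) both succeed (and agree) for
-- every iterated key, so '(dict.lookup k).getD 0' (first match) is exact here.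
def countt (dict : List (Int × Int)) (xlist : List Int) (ylist : List Int) (qlist : List Int) : List (List Int) :=
  (dict.map Prod.fst).foldl (fun xdict i =>
    (dict.map Prod.fst).foldl (fun xdict j =>
      if [j, (dict.lookup j).getD 0] ∈ xdict then xdict
      else if PySem.List.count ylist ((dict.lookup j).getD 0) ≠ 1 then
        (if (dict.lookup i).getD 0 = (dict.lookup j).getD 0 then
          xdict ++ [[j, (dict.lookup j).getD 0]]
        else xdict)
      else xdict) xdict) []

-- ===== PORT B =====
-- helper for B's inner 'for g in groups: … break / else append' locate-by-== loop
def pvInsertGroup (v k : Int) : List (Int × List Int) → List (Int × List Int)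
  | [] => [(v, [k])]
  | (u, g) :: rest => if u = v then (u, g ++ [k]) :: rest else (u, g) :: pvInsertGroup v k rest

def countt_alt (dict : List (Int × Int)) (xlist : List Int) (ylist : List Int) (qlist : List Int) : List (List Int) :=
  let groups := (dict.map Prod.fst).foldl (fun gs k => pvInsertGroup ((dict.lookup k).getD 0) k gs) []
  groups.foldl (fun out g =>
    if PySem.List.count ylist g.1 ≠ 1 then out ++ g.2.map (fun k => [k, g.1]) else out) []

-- ===== PRECONDITION & SPEC =====
-- Pre_ : the association list has pairwise-distinct keys, i.e. it represents a Python
-- dict (A's parameter IS a dict, so no Python input is excluded; on duplicate-key lists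
-- the two ports differ because A dedups entries by membership).
def Pre_countt (dict : List (Int × Int)) (xlist : List Int) (ylist : List Int) (qlist : List Int) : Prop :=
  (dict.map Prod.fst).Nodup
instance (dict : List (Int × Int)) (xlist : List Int) (ylist : List Int) (qlist : List Int) : Decidable (Pre_countt dict xlist ylist qlist) := by unfold Pre_countt; infer_instance

def pvWitness_countt : (List (Int × Int)) × List Int × List Int × List Int :=
  ([(1, 2), (3, 2)], [], [2, 2], [])

def Spec_countt (dict : List (Int × Int)) (xlist : List Int) (ylist : List Int) (qlist : List Int) (out : List (List Int)) : Prop := out = countt_alt dict xlist ylist qlist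
instance (dict : List (Int × Int)) (xlist : List Int) (ylist : List Int) (qlist : List Int) (out : List (List Int)) : Decidable (Spec_countt dict xlist ylist qlist out) := by unfold Spec_countt; infer_instance

-- ===== CLAIM (what is proved, stated in full; the proofs are below) =====
def Claim_equal_countt : Prop := ∀ (dict : List (Int × Int)) (xlist : List Int) (ylist : List Int) (qlist : List Int), Dom_countt dict xlist ylist qlist → Pre_countt dict xlist ylist qlist → Spec_countt dict xlist ylist qlist (countt dict xlist ylist qlist)

-- ===== LEMMAS AND PROOFS =====

-- ordered first-occurrence accumulation of distinct values ('x in acc' dedup step)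
def pvDstep (acc : List Int) (x : Int) : List Int := if x ∈ acc then acc else acc ++ [x]

-- the common normal form of both programs: for each value u of D (in order) whose
-- ylist-count is ≠ 1, the pairs [j, u] for every key j of ks with value u, in key order
def pvEmit (ylist : List Int) (f : Int → Int) (ks D : List Int) : List (List Int) :=
  D.flatMap (fun u =>
    if PySem.List.count ylist u ≠ 1 then (ks.filter (fun j => f j = u)).map (fun j => [j, u]) else [])

-- A's inner-loop step, with u = value of the outer key i
def pvStepA (ylist : List Int) (f : Int → Int) (u : Int) (x : List (List Int)) (j : Int) : List (List Int) :=
  if [j, f j] ∈ x then x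
  else if PySem.List.count ylist (f j) ≠ 1 then
    (if u = f j then x ++ [[j, f j]] else x)
  else x

lemma pv_mem_foldl_dstep (l : List Int) (acc : List Int) (x : Int) :
    x ∈ l.foldl pvDstep acc ↔ x ∈ acc ∨ x ∈ l := by
  induction l generalizing acc with
  | nil => simp
  | cons a l ih =>
    simp only [List.foldl_cons, ih, pvDstep]
    split_ifs with h <;> simp <;> aesop

lemma pv_nodup_foldl_dstep (l : List Int) (acc : List Int) (h : acc.Nodup) :
    (l.foldl pvDstep acc).Nodup := by
  induction l generalizing acc with
  | nil => exact h
  | cons a l ih =>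
    simp only [List.foldl_cons, pvDstep]
    split_ifs with ha
    · exact ih acc h
    · exact ih _ (by simp [List.nodup_append, h]; exact fun b hb hba => ha (hba ▸ hb))

lemma pv_pair_mem_emit (ylist : List Int) (f : Int → Int) (ks D : List Int) (l : List Int)
    (h : l ∈ pvEmit ylist f ks D) : ∃ u ∈ D, ∃ j ∈ ks, f j = u ∧ l = [j, u] := by
  simp only [pvEmit, List.mem_flatMap] at h
  obtain ⟨u, hu, hl⟩ := h
  split_ifs at hl with hp
  · simp only [List.mem_map, List.mem_filter, decide_eq_true_eq] at hl
    obtain ⟨j, ⟨hj, hfj⟩, rfl⟩ := hl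
    exact ⟨u, hu, j, hj, hfj, rfl⟩
  · simp at hl

lemma pv_mem_emit_of (ylist : List Int) (f : Int → Int) (ks D : List Int) (u j : Int)
    (hj : j ∈ ks) (hf : f j = u) (hu : u ∈ D) (hp : PySem.List.count ylist u ≠ 1) :
    [j, u] ∈ pvEmit ylist f ks D := by
  simp only [pvEmit, List.mem_flatMap]
  refine ⟨u, hu, ?_⟩
  rw [if_pos hp]
  simp only [List.mem_map, List.mem_filter, decide_eq_true_eq]
  exact ⟨j, ⟨hj, hf⟩, rfl⟩

lemma pv_emit_append_singleton (ylist : List Int) (f : Int → Int) (ks D : List Int) (u : Int) :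
    pvEmit ylist f ks (D ++ [u]) = pvEmit ylist f ks D ++
      (if PySem.List.count ylist u ≠ 1 then (ks.filter (fun j => f j = u)).map (fun j => [j, u]) else []) := by
  simp [pvEmit]

-- inner loop is a no-op when the outer key's value has ylist-count 1
lemma pv_inner_count_one (ylist : List Int) (f : Int → Int) (u : Int)
    (hp : ¬ PySem.List.count ylist u ≠ 1) (js : List Int) (x : List (List Int)) :
    js.foldl (pvStepA ylist f u) x = x := by
  induction js generalizing x with
  | nil => rfl
  | cons j js ih =>
    have hstep : pvStepA ylist f u x j = x := by
      unfold pvStepA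
      split_ifs with h1 h2 h3 <;> try rfl
      exact absurd (h3 ▸ h2) hp
    simp only [List.foldl_cons, hstep, ih]

-- inner loop is a no-op when the outer key's value was already processed
lemma pv_inner_seen (ylist : List Int) (f : Int → Int) (ks D : List Int) (u : Int)
    (hu : u ∈ D) (js : List Int) (hsub : ∀ j ∈ js, j ∈ ks) :
    js.foldl (pvStepA ylist f u) (pvEmit ylist f ks D) = pvEmit ylist f ks D := by
  induction js with
  | nil => rfl
  | cons j js ih =>
    have hstep : pvStepA ylist f u (pvEmit ylist f ks D) j = pvEmit ylist f ks D := by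
      unfold pvStepA
      split_ifs with h1 h2 h3 <;> try rfl
      exact absurd (pv_mem_emit_of ylist f ks D (f j) j (hsub j (by simp)) rfl (h3 ▸ hu) h2) h1
    simp only [List.foldl_cons, hstep]
    exact ih (fun j hj => hsub j (by simp [hj]))

-- inner loop appends exactly the whole group of a fresh qualifying value
lemma pv_inner_new (ylist : List Int) (f : Int → Int) (ks D : List Int) (u : Int)
    (hu : u ∉ D) (hp : PySem.List.count ylist u ≠ 1) (js g : List Int)
    (hnd : js.Nodup) (hg : ∀ x ∈ js, x ∉ g) :
    js.foldl (pvStepA ylist f u) (pvEmit ylist f ks D ++ g.map (fun k => [k, u])) =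
      pvEmit ylist f ks D ++ (g ++ js.filter (fun j => f j = u)).map (fun k => [k, u]) := by
  induction js generalizing g with
  | nil => simp
  | cons j js ih =>
    have hjjs : j ∉ js := (List.nodup_cons.mp hnd).1
    have hnd' : js.Nodup := (List.nodup_cons.mp hnd).2
    by_cases hfj : f j = u
    · have hmem : [j, f j] ∉ pvEmit ylist f ks D ++ g.map (fun k => [k, u]) := by
        rw [hfj]
        intro hc
        rcases List.mem_append.mp hc with hc | hc
        · obtain ⟨u', hu', j', _, _, heq⟩ := pv_pair_mem_emit ylist f ks D _ hc
          have : u' = u := by simpa using congrArg (fun l => l.getLast?) heq.symm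
          exact hu (this ▸ hu')
        · obtain ⟨k, hk, heq⟩ := List.mem_map.mp hc
          have : k = j := by simpa using congrArg (fun l => l.head?) heq
          exact hg j (by simp) (this ▸ hk)
      have hstep : pvStepA ylist f u (pvEmit ylist f ks D ++ g.map (fun k => [k, u])) j =
          pvEmit ylist f ks D ++ ((g ++ [j]).map (fun k => [k, u])) := by
        unfold pvStepA
        rw [if_neg hmem, if_pos (hfj ▸ hp), if_pos hfj.symm, hfj]
        simp
      simp only [List.foldl_cons, hstep]
      rw [ih (g ++ [j]) hnd' ?_]
      · simp [hfj, List.filter_cons]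
      · intro x hx
        simp only [List.mem_append, List.mem_singleton]
        rintro (h | rfl)
        · exact hg x (by simp [hx]) h
        · exact hjjs hx
    · have hstep : pvStepA ylist f u (pvEmit ylist f ks D ++ g.map (fun k => [k, u])) j =
          pvEmit ylist f ks D ++ g.map (fun k => [k, u]) := by
        unfold pvStepA
        split_ifs with h1 h2 h3 <;> try rfl
        exact absurd h3.symm hfj
      simp only [List.foldl_cons, hstep]
      rw [ih g hnd' (fun x hx => hg x (by simp [hx]))]
      simp [List.filter_cons, hfj]

-- A's outer loop: state is pvEmit of the distinct values seen so far
lemma pv_outer (ylist : List Int) (f : Int → Int) (ks : List Int) (hnd : ks.Nodup)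
    (is : List Int) (D : List Int) :
    is.foldl (fun x i => ks.foldl (pvStepA ylist f (f i)) x) (pvEmit ylist f ks D) =
      pvEmit ylist f ks ((is.map f).foldl pvDstep D) := by
  induction is generalizing D with
  | nil => rfl
  | cons i is ih =>
    simp only [List.foldl_cons, List.map_cons]
    by_cases hp : PySem.List.count ylist (f i) ≠ 1
    · by_cases hu : f i ∈ D
      · rw [pv_inner_seen ylist f ks D (f i) hu ks (fun _ h => h)]
        rw [show pvDstep D (f i) = D from if_pos hu]
        exact ih D
      · have hin : ks.foldl (pvStepA ylist f (f i)) (pvEmit ylist f ks D) =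
            pvEmit ylist f ks (D ++ [f i]) := by
          have h3 := pv_inner_new ylist f ks D (f i) hu hp ks [] hnd (by simp)
          rw [pv_emit_append_singleton, if_pos hp]
          simpa using h3
        rw [hin, show pvDstep D (f i) = D ++ [f i] from if_neg hu]
        exact ih (D ++ [f i])
    · rw [pv_inner_count_one ylist f (f i) hp ks (pvEmit ylist f ks D)]
      by_cases hu : f i ∈ D
      · rw [show pvDstep D (f i) = D from if_pos hu]
        exact ih D
      · rw [show pvDstep D (f i) = D ++ [f i] from if_neg hu]
        have hE : pvEmit ylist f ks (D ++ [f i]) = pvEmit ylist f ks D := by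
          rw [pv_emit_append_singleton, if_neg hp, List.append_nil]
        rw [← hE]
        exact ih (D ++ [f i])

lemma pv_countt_eq_emit (dict : List (Int × Int)) (xlist ylist qlist : List Int)
    (hnd : (dict.map Prod.fst).Nodup) :
    countt dict xlist ylist qlist =
      pvEmit ylist (fun k => (dict.lookup k).getD 0) (dict.map Prod.fst)
        (((dict.map Prod.fst).map (fun k => (dict.lookup k).getD 0)).foldl pvDstep []) := by
  have h := pv_outer ylist (fun k => (dict.lookup k).getD 0) (dict.map Prod.fst) hnd
    (dict.map Prod.fst) []
  simpa [pvEmit] using h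

-- B's grouping pass: groups = distinct values (first occurrence) paired with their key lists
lemma pv_insertGroup_map (v k : Int) (sel : Int → List Int) (us : List Int) (hnd : us.Nodup) :
    pvInsertGroup v k (us.map (fun u => (u, sel u))) =
      if v ∈ us then us.map (fun u => (u, if u = v then sel u ++ [k] else sel u))
      else us.map (fun u => (u, sel u)) ++ [(v, [k])] := by
  induction us with
  | nil => simp [pvInsertGroup]
  | cons u us ih =>
    have hjus : u ∉ us := (List.nodup_cons.mp hnd).1
    have hnd' : us.Nodup := (List.nodup_cons.mp hnd).2
    by_cases h : u = v
    · subst h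
      rw [List.map_cons, show pvInsertGroup u k ((u, sel u) :: us.map (fun u => (u, sel u))) =
          (u, sel u ++ [k]) :: us.map (fun u => (u, sel u)) from by simp [pvInsertGroup],
        if_pos (by simp), List.map_cons, if_pos rfl]
      congr 1
      exact List.map_congr_left (fun x hx => by
        simp [show ¬ x = u from fun hxu => hjus (hxu ▸ hx)])
    · rw [List.map_cons, show pvInsertGroup v k ((u, sel u) :: us.map (fun u => (u, sel u))) =
          (u, sel u) :: pvInsertGroup v k (us.map (fun u => (u, sel u))) from by
            simp [pvInsertGroup, h],
        ih hnd']
      by_cases hv : v ∈ us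
      · rw [if_pos hv, if_pos (List.mem_cons_of_mem u hv), List.map_cons, if_neg h]
      · rw [if_neg hv, if_neg (by simp only [List.mem_cons]; rintro (rfl | hh); exacts [h rfl, hv hh]), List.cons_append]

lemma pv_groups_inv (f : Int → Int) (P : List Int) :
    P.foldl (fun gs k => pvInsertGroup (f k) k gs) [] =
      ((P.map f).foldl pvDstep []).map (fun u => (u, P.filter (fun k => f k = u))) := by
  induction P using List.reverseRecOn with
  | nil => simp
  | append_singleton P k ih =>
    rw [List.foldl_append, List.map_append, List.foldl_append, ih]
    simp only [List.foldl_cons, List.foldl_nil, List.map_cons, List.map_nil]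
    rw [pv_insertGroup_map (f k) k _ _ (pv_nodup_foldl_dstep _ _ (by simp))]
    simp only [pvDstep, pv_mem_foldl_dstep, List.not_mem_nil, false_or]
    by_cases hv : f k ∈ P.map f
    · rw [if_pos hv, if_pos hv]
      refine List.map_congr_left (fun u _ => ?_)
      by_cases hu : u = f k
      · simp [hu, List.filter_append]
      · have hne : ¬ f k = u := fun h => hu h.symm
        simp [hu, hne, List.filter_append]
    · rw [if_neg hv, if_neg hv, List.map_append]
      congr 1
      · refine List.map_congr_left (fun u hu => ?_)
        have hne : f k ≠ u := fun h => hv (h ▸ ((pv_mem_foldl_dstep _ _ _).mp hu).resolve_left (by simp))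
        simp [List.filter_append, hne]
      · have hnil : P.filter (fun k' => f k' = f k) = [] := by
          rw [List.filter_eq_nil_iff]
          intro a ha hc
          exact hv (by simpa using ⟨a, ha, by simpa using hc⟩)
        simp [List.filter_append, List.filter_cons, hnil]

lemma pv_emit_groups (ylist : List Int) (f : Int → Int) (ks : List Int)
    (us : List Int) (out0 : List (List Int)) :
    (us.map (fun u => (u, ks.filter (fun j => f j = u)))).foldl
      (fun out g => if PySem.List.count ylist g.1 ≠ 1 then out ++ g.2.map (fun k => [k, g.1]) else out)
      out0 = out0 ++ pvEmit ylist f ks us := by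
  induction us generalizing out0 with
  | nil => simp [pvEmit]
  | cons u us ih =>
    simp only [List.map_cons, List.foldl_cons, pvEmit, List.flatMap_cons]
    by_cases hp : PySem.List.count ylist u ≠ 1
    · rw [if_pos hp, if_pos hp, ih]
      simp [pvEmit, List.append_assoc]
    · rw [if_neg hp, if_neg hp, ih]
      simp [pvEmit]

lemma pv_countt_alt_eq_emit (dict : List (Int × Int)) (xlist ylist qlist : List Int) :
    countt_alt dict xlist ylist qlist =
      pvEmit ylist (fun k => (dict.lookup k).getD 0) (dict.map Prod.fst)
        (((dict.map Prod.fst).map (fun k => (dict.lookup k).getD 0)).foldl pvDstep []) := by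
  show ((dict.map Prod.fst).foldl
      (fun gs k => pvInsertGroup ((dict.lookup k).getD 0) k gs) []).foldl _ [] = _
  rw [pv_groups_inv (fun k => (dict.lookup k).getD 0) (dict.map Prod.fst),
    pv_emit_groups]
  simp

-- ===== VERDICT (by name: the statement is the Claim_ definition above) =====
theorem countt_spec : Claim_equal_countt := by
  intro dict xlist ylist qlist _ hpre
  show countt dict xlist ylist qlist = countt_alt dict xlist ylist qlist
  rw [pv_countt_eq_emit dict xlist ylist qlist hpre, pv_countt_alt_eq_emit]
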